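-- pv_equiv track=rewrite | github.com/Fructokinase/website | server/services/discovery.py | find_host
-- ===== SOURCE A (Python) =====
-- from typing import Dict, List, TypeVar, Tuple
--
-- def find_host(path: str, ingress_rules: Dict[str, List[str]]) -> str:
--     """Returns host with the pattern closest to a given path.
--
--     For more on what is a pattern, see GCP doc.
--     https://cloud.google.com/load-balancing/docs/url-map-concepts#wildcards-regx-dynamic
--     """
--     match_host, match_pattern = '', ''
--     for host, patterns in ingress_rules.items():
--         for pattern in patterns:
--             # Pattern has wild card.
--             if pattern.endswith('/*'):
--                 pattern_prefix = pattern[:-len('/*')]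
--                 if not path.startswith(pattern_prefix):
--                     continue
--                 if len(pattern) > len(match_pattern):
--                     match_pattern = pattern
--                     match_host = host
--
--             # Pattern does not have wild, card -> exact match.
--             if not path.startswith(pattern):
--                 continue
--             if len(pattern) > len(match_pattern):
--                 match_pattern = pattern
--                 match_host = host
--
--     return match_host
-- ===== SOURCE B (Python) =====
-- def find_host(path: str, ingress_rules) -> str:
--     """Sort-by-specificity re-implementation: flatten to (host, pattern) pairs,
--     stable-sort by descending pattern length, return the host of the first
--     matching pattern.  Empty patterns are skipped: under the strictly-longer
--     rule they can never be selected anyway."""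
--     def matches(pattern):
--         if pattern.endswith('/*') and path.startswith(pattern[:-2]):
--             return True
--         return path.startswith(pattern)
--
--     pairs = [(host, pattern)
--              for host, patterns in ingress_rules.items()
--              for pattern in patterns if pattern]
--     pairs.sort(key=lambda hp: len(hp[1]), reverse=True)  # stable
--     for host, pattern in pairs:
--         if matches(pattern):
--             return host
--     return ''
-- ===== Notes on version B (the rewrite author's own statement) =====
-- stated objective: alternative
-- what changed: Replaces A's nested running-best scan (two matching branches updating a (host, pattern) maximum in place) by flattening the rules to (host, pattern) pairs, stable-sorting them by descending pattern length, and returning the host of the first pair satisfying a single unified match predicate.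
import Mathlib
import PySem

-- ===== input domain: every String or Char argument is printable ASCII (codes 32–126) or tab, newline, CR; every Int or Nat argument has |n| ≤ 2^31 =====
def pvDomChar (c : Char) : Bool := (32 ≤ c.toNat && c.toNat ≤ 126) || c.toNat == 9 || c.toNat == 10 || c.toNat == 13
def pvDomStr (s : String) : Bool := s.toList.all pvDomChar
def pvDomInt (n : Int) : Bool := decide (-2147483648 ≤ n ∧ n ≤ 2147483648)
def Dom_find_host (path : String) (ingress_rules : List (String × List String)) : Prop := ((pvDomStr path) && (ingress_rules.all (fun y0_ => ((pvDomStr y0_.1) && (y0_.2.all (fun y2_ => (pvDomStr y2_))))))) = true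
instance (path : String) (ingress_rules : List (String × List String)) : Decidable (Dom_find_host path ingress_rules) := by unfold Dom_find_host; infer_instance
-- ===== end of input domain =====

-- B replaces A's running-best nested scan by flatten → stable sort by descending pattern length → first match (objective: alternative).

-- ===== PORT A =====
-- one iteration of A's inner loop body (state = (match_host, match_pattern));
-- a 'continue' is the early 'acc' return; the wildcard branch falls through to the exact branch as in A
def find_host_step (path host : String) (acc : String × String) (pattern : String) : String × String :=
  if PySem.Str.endswith pattern "/*" = true then
    -- pattern[:-len('/*')] = pattern[:-2]
    if PySem.Str.startswith path (PySem.Str.slice pattern none (some (-2))) = true then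
      let acc1 := if PySem.Str.len acc.2 < PySem.Str.len pattern then (host, pattern) else acc
      if PySem.Str.startswith path pattern = true then
        (if PySem.Str.len acc1.2 < PySem.Str.len pattern then (host, pattern) else acc1)
      else acc1
    else acc
  else
    if PySem.Str.startswith path pattern = true then
      (if PySem.Str.len acc.2 < PySem.Str.len pattern then (host, pattern) else acc)
    else acc

def find_host (path : String) (ingress_rules : List (String × List String)) : String :=
  (ingress_rules.foldl (fun acc hp => hp.2.foldl (find_host_step path hp.1) acc) ("", "")).1

-- ===== PORT B =====
-- Source B's 'matches(pattern)'
def find_host_matches (path pattern : String) : Bool :=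
  if PySem.Str.endswith pattern "/*" && PySem.Str.startswith path (PySem.Str.slice pattern none (some (-2))) then
    true
  else
    PySem.Str.startswith path pattern

def find_host_alt (path : String) (ingress_rules : List (String × List String)) : String :=
  let pairs := ingress_rules.flatMap (fun hp => (hp.2.filter (fun p => p != "")).map (fun p => (hp.1, p)))
  let spairs := PySem.List.sorted pairs (fun hp => PySem.Str.len hp.2) true
  match spairs.find? (fun hp => find_host_matches path hp.2) with
  | some hp => hp.1
  | none => ""

-- ===== PRECONDITION & SPEC =====
def Spec_find_host (path : String) (ingress_rules : List (String × List String)) (out : String) : Prop := out = find_host_alt path ingress_rules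
instance (path : String) (ingress_rules : List (String × List String)) (out : String) : Decidable (Spec_find_host path ingress_rules out) := by unfold Spec_find_host; infer_instance

-- ===== CLAIM (what is proved, stated in full; the proofs are below) =====
def Claim_equal_find_host : Prop := ∀ (path : String) (ingress_rules : List (String × List String)), Dom_find_host path ingress_rules → Spec_find_host path ingress_rules (find_host path ingress_rules)

-- ===== LEMMAS AND PROOFS =====

-- simplified one-pair step equivalent to A's loop body
def stepS (path : String) (acc x : String × String) : String × String :=
  if find_host_matches path x.2 && decide (PySem.Str.len acc.2 < PySem.Str.len x.2) then x else acc

-- the "first match of the sorted list" computed as a left fold over the unsorted list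
def gstep (path : String) (r : Option (String × String)) (x : String × String) : Option (String × String) :=
  if find_host_matches path x.2 &&
      (match r with | some f => decide (PySem.Str.len f.2 < PySem.Str.len x.2) | none => true) then
    some x
  else r

lemma strLen_lt (s t : String) : PySem.Str.len s < PySem.Str.len t ↔ s.length < t.length := by
  simp [PySem.Str.len_eq]

lemma chars_startswith_slice (path p : List Char)
    (h : PySem.Chars.startswith path p = true) :
    PySem.Chars.startswith path (PySem.List.slice p none (some (-2))) = true := by
  rw [PySem.Chars.startswith_iff] at h ⊢
  refine List.IsPrefix.trans ?_ h
  simp only [PySem.List.slice]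
  exact List.take_prefix _ _

lemma star_toList : ("/*" : String).toList = ['/', '*'] := by rfl

lemma step_eq (path host : String) (acc : String × String) (pattern : String) :
    find_host_step path host acc pattern = stepS path acc (host, pattern) := by
  by_cases he : PySem.Chars.endswith pattern.toList ['/', '*'] = true
  · by_cases hp : PySem.Chars.startswith path.toList (PySem.List.slice pattern.toList none (some (-2))) = true
    · have hm : find_host_matches path pattern = true := by
        simp [find_host_matches, he, hp]
      simp only [find_host_step, stepS, hm, Bool.true_and, decide_eq_true_eq, PySem.Str.len_eq,
        PySem.Str.endswith_eq, PySem.Str.startswith_eq, PySem.Str.toList_slice,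
        PySem.Chars.slice_eq_listSlice, star_toList, he, hp, if_true]
      push_cast
      split_ifs <;> first | rfl | omega | (simp_all; omega) | simp_all
    · have hsw : PySem.Chars.startswith path.toList pattern.toList = false := by
        cases hsp : PySem.Chars.startswith path.toList pattern.toList
        · rfl
        · exact absurd (chars_startswith_slice path.toList pattern.toList hsp) hp
      have hm : find_host_matches path pattern = false := by
        simp only [find_host_matches, PySem.Str.endswith_eq, PySem.Str.startswith_eq,
          PySem.Str.toList_slice, PySem.Chars.slice_eq_listSlice]
        simp [hp, hsw]
      simp only [find_host_step, stepS, hm, Bool.false_and, Bool.false_eq_true, if_false,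
        PySem.Str.endswith_eq, PySem.Str.startswith_eq, PySem.Str.toList_slice,
        PySem.Chars.slice_eq_listSlice, star_toList, he, if_true, if_neg hp]
  · have heb : PySem.Chars.endswith pattern.toList ['/', '*'] = false := by
      cases h : PySem.Chars.endswith pattern.toList ['/', '*']
      · rfl
      · exact absurd h he
    have hm : find_host_matches path pattern = PySem.Str.startswith path pattern := by
      simp only [find_host_matches, PySem.Str.endswith_eq]
      simp [heb]
    simp only [find_host_step, stepS, hm, PySem.Str.len_eq, PySem.Str.endswith_eq,
      PySem.Str.startswith_eq, star_toList, decide_eq_true_eq, if_neg he]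
    push_cast
    split_ifs <;> first | rfl | omega | (simp_all; omega) | simp_all

lemma inner_foldl (path host : String) (ps : List String) (acc : String × String) :
    ps.foldl (find_host_step path host) acc
      = (ps.map (fun p => (host, p))).foldl (stepS path) acc := by
  induction ps generalizing acc with
  | nil => rfl
  | cons p t ih => simp only [List.foldl_cons, List.map_cons, step_eq]; exact ih _

lemma outer_foldl (path : String) (rules : List (String × List String)) (acc : String × String) :
    rules.foldl (fun acc hp => hp.2.foldl (find_host_step path hp.1) acc) acc
      = (rules.flatMap (fun hp => hp.2.map (fun p => (hp.1, p)))).foldl (stepS path) acc := by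
  induction rules generalizing acc with
  | nil => rfl
  | cons hp t ih =>
      rw [List.foldl_cons, List.flatMap_cons, List.foldl_append, ih, inner_foldl]

-- an empty pattern never changes the state (its length exceeds no length), so filtering them out is a no-op
lemma stepS_empty (path : String) (acc x : String × String) (hx : x.2 = "") :
    stepS path acc x = acc := by
  have hn : ¬ acc.2.length < x.2.length := by rw [hx]; simp
  simp [stepS, hn]

lemma foldl_stepS_filter (path : String) (l : List (String × String)) (acc : String × String) :
    (l.filter (fun hp => hp.2 != "")).foldl (stepS path) acc = l.foldl (stepS path) acc := by
  induction l generalizing acc with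
  | nil => rfl
  | cons x t ih =>
      by_cases hx : x.2 = ""
      · have hb : (x.2 != "") = false := by simp [hx]
        rw [List.filter_cons, hb]
        simp only [Bool.false_eq_true, if_false]
        rw [List.foldl_cons, stepS_empty path acc x hx]
        exact ih acc
      · have hb : (x.2 != "") = true := by simp [hx]
        rw [List.filter_cons, hb, if_pos rfl, List.foldl_cons, List.foldl_cons]
        exact ih _

lemma flatMap_filter (rules : List (String × List String)) :
    rules.flatMap (fun hp => (hp.2.filter (fun p => p != "")).map (fun p => (hp.1, p)))
      = (rules.flatMap (fun hp => hp.2.map (fun p => (hp.1, p)))).filter (fun hp => hp.2 != "") := by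
  induction rules with
  | nil => rfl
  | cons hp t ih =>
      simp only [List.flatMap_cons, List.filter_append, ih]
      congr 1
      induction hp.2 with
      | nil => rfl
      | cons p ps ihp =>
          by_cases hps : (p != "") = true
          · simp [hps, ihp]
          · simp only [Bool.not_eq_true] at hps
            simp [hps, ihp]

-- find? over a stable descending insertion = one gstep
lemma find?_insertBy (path : String) (x : String × String) (ys : List (String × String))
    (hys : ys.Pairwise (fun a b => PySem.Str.len b.2 ≤ PySem.Str.len a.2)) :
    (PySem.List.insertBy (fun a b => decide (PySem.Str.len b.2 < PySem.Str.len a.2)) x ys).find?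
        (fun hp => find_host_matches path hp.2)
      = gstep path (ys.find? (fun hp => find_host_matches path hp.2)) x := by
  induction ys with
  | nil =>
      simp only [PySem.List.insertBy, List.find?_nil, gstep]
      cases hm : find_host_matches path x.2 <;> simp [List.find?_cons, hm]
  | cons y t ih =>
      rcases List.pairwise_cons.mp hys with ⟨hy, ht⟩
      by_cases hlt : PySem.Str.len y.2 < PySem.Str.len x.2
      · have hltN : y.2.length < x.2.length := (strLen_lt _ _).mp hlt
        have hins : PySem.List.insertBy (fun a b => decide (PySem.Str.len b.2 < PySem.Str.len a.2)) x (y :: t)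
            = x :: y :: t := by
          simp [PySem.List.insertBy, PySem.Str.len_eq, hltN]
        rw [hins]
        cases hm : find_host_matches path x.2
        · simp [List.find?_cons, hm, gstep]
        · have hcond : (match (y :: t).find? (fun hp => find_host_matches path hp.2) with
              | some f => decide (PySem.Str.len f.2 < PySem.Str.len x.2) | none => true) = true := by
            cases hf : (y :: t).find? (fun hp => find_host_matches path hp.2) with
            | none => rfl
            | some f =>
                have hfm := List.mem_of_find?_eq_some hf
                have hle : PySem.Str.len f.2 ≤ PySem.Str.len y.2 := by
                  rcases List.mem_cons.mp hfm with h | h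
                  · subst h; exact le_refl _
                  · exact hy f h
                exact decide_eq_true (lt_of_le_of_lt hle hlt)
        
          unfold gstep
          rw [hm, Bool.true_and, hcond, if_pos rfl]
          simp [List.find?_cons, hm]
      · have hltN' : ¬ y.2.length < x.2.length := fun h => hlt ((strLen_lt _ _).mpr h)
        have hins : PySem.List.insertBy (fun a b => decide (PySem.Str.len b.2 < PySem.Str.len a.2)) x (y :: t)
            = y :: PySem.List.insertBy (fun a b => decide (PySem.Str.len b.2 < PySem.Str.len a.2)) x t := by
          simp [PySem.List.insertBy, PySem.Str.len_eq, hltN']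
        rw [hins]
        cases hm : find_host_matches path y.2
        · simp only [List.find?_cons, hm]
          exact ih ht
        · have hd : decide (PySem.Str.len y.2 < PySem.Str.len x.2) = false := decide_eq_false hlt
          simp only [List.find?_cons, hm, gstep, hd, Bool.and_false, Bool.false_eq_true, if_false]

lemma pairwise_insertBy (x : String × String) (ys : List (String × String))
    (hys : ys.Pairwise (fun a b => PySem.Str.len b.2 ≤ PySem.Str.len a.2)) :
    (PySem.List.insertBy (fun a b => decide (PySem.Str.len b.2 < PySem.Str.len a.2)) x ys).Pairwise
      (fun a b => PySem.Str.len b.2 ≤ PySem.Str.len a.2) := by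
  induction ys with
  | nil => simp [PySem.List.insertBy]
  | cons y t ih =>
      rcases List.pairwise_cons.mp hys with ⟨hy, ht⟩
      by_cases hlt : PySem.Str.len y.2 < PySem.Str.len x.2
      · have hltN : y.2.length < x.2.length := (strLen_lt _ _).mp hlt
        have hins : PySem.List.insertBy (fun a b => decide (PySem.Str.len b.2 < PySem.Str.len a.2)) x (y :: t)
            = x :: y :: t := by
          simp [PySem.List.insertBy, PySem.Str.len_eq, hltN]
        rw [hins]
        refine List.pairwise_cons.mpr ⟨?_, hys⟩
        intro z hz
        rcases List.mem_cons.mp hz with h | h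
        · subst h; exact le_of_lt hlt
        · exact le_trans (hy z h) (le_of_lt hlt)
      · have hltN' : ¬ y.2.length < x.2.length := fun h => hlt ((strLen_lt _ _).mpr h)
        have hins : PySem.List.insertBy (fun a b => decide (PySem.Str.len b.2 < PySem.Str.len a.2)) x (y :: t)
            = y :: PySem.List.insertBy (fun a b => decide (PySem.Str.len b.2 < PySem.Str.len a.2)) x t := by
          simp [PySem.List.insertBy, PySem.Str.len_eq, hltN']
        rw [hins]
        refine List.pairwise_cons.mpr ⟨?_, ih ht⟩
        intro z hz
        rcases (PySem.List.mem_insertBy _ x z t).mp hz with h | h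
        · subst h; exact le_of_not_gt hlt
        · exact hy z h

lemma find?_foldl_insertBy (path : String) (l : List (String × String)) :
    ∀ (acc : List (String × String)),
      acc.Pairwise (fun a b => PySem.Str.len b.2 ≤ PySem.Str.len a.2) →
      (l.foldl (fun acc x => PySem.List.insertBy (fun a b => decide (PySem.Str.len b.2 < PySem.Str.len a.2)) x acc) acc).find?
          (fun hp => find_host_matches path hp.2)
        = l.foldl (gstep path) (acc.find? (fun hp => find_host_matches path hp.2)) := by
  induction l with
  | nil => intro acc _; rfl
  | cons x t ih =>
      intro acc hacc
      simp only [List.foldl_cons]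
      rw [ih _ (pairwise_insertBy x acc hacc), find?_insertBy path x acc hacc]

lemma find?_sorted (path : String) (l : List (String × String)) :
    (PySem.List.sorted l (fun hp => PySem.Str.len hp.2) true).find? (fun hp => find_host_matches path hp.2)
      = l.foldl (gstep path) none := by
  rw [PySem.List.sorted_rev_eq_foldl_insertBy]
  exact find?_foldl_insertBy path l [] List.Pairwise.nil

lemma foldl_g_some (path : String) (l : List (String × String)) :
    ∀ f : String × String, l.foldl (gstep path) (some f) = some (l.foldl (stepS path) f) := by
  induction l with
  | nil => intro f; rfl
  | cons x t ih =>
      intro f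
      simp only [List.foldl_cons, gstep, stepS]
      by_cases hc : (find_host_matches path x.2 && decide (PySem.Str.len f.2 < PySem.Str.len x.2)) = true
      · simp only [hc, if_true]; exact ih x
      · simp only [Bool.not_eq_true] at hc
        simp only [hc, Bool.false_eq_true, if_false]
        exact ih f

lemma foldl_g_none (path : String) (l : List (String × String))
    (hl : ∀ x ∈ l, x.2.toList ≠ []) :
    (l.foldl (gstep path) none = none ∧ l.foldl (stepS path) ("", "") = ("", ""))
      ∨ l.foldl (gstep path) none = some (l.foldl (stepS path) ("", "")) := by
  induction l with
  | nil => left; exact ⟨rfl, rfl⟩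
  | cons x t ih =>
      simp only [List.foldl_cons]
      cases hm : find_host_matches path x.2
      · have hg : gstep path none x = none := by simp [gstep, hm]
        have hs : stepS path ("", "") x = ("", "") := by simp [stepS, hm]
        rw [hg, hs]
        exact ih (fun y hy => hl y (List.mem_cons_of_mem _ hy))
      · have hlen : PySem.Str.len "" < PySem.Str.len x.2 := by
          rw [PySem.Str.len_eq, PySem.Str.len_eq]
          have := List.length_pos_iff.mpr (hl x List.mem_cons_self)
          simp only [String.toList_empty, List.length_nil, Nat.cast_zero]
          exact_mod_cast this
        have hg : gstep path none x = some x := by simp [gstep, hm]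
        have hne : x.2 ≠ "" := by
          intro h
          exact hl x List.mem_cons_self (by rw [h]; rfl)
        have hs : stepS path ("", "") x = x := by
          simp [stepS, hm, decide_eq_true hlen, hne]
        rw [hg, hs]
        right
        exact foldl_g_some path t x

lemma mem_pairsB_ne_nil (rules : List (String × List String)) (x : String × String)
    (hx : x ∈ rules.flatMap (fun hp => (hp.2.filter (fun p => p != "")).map (fun p => (hp.1, p)))) :
    x.2.toList ≠ [] := by
  rcases List.mem_flatMap.mp hx with ⟨hp, _, hmem⟩
  rcases List.mem_map.mp hmem with ⟨p, hpf, hpe⟩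
  have hne : p ≠ "" := by
    have := (List.mem_filter.mp hpf).2
    simpa using this
  have hxp : x.2 = p := by rw [← hpe]
  rw [hxp]
  intro h2
  exact hne (String.ext (by simpa using h2))

-- ===== VERDICT (by name: the statement is the Claim_ definition above) =====
theorem find_host_spec : Claim_equal_find_host := by
  intro path rules _
  unfold Spec_find_host find_host find_host_alt
  rw [outer_foldl]
  rw [← foldl_stepS_filter path _ ("", "")]
  rw [← flatMap_filter]
  simp only [find?_sorted]
  rcases foldl_g_none path _ (mem_pairsB_ne_nil rules) with ⟨h1, h2⟩ | h
  · rw [h1, h2]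
  · rw [h]
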